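-- pv_equiv track=rewrite | github.com/daceroso/python-challenges | challenge_string/excercises/no_duplicate_chars.py | check_no_duplicate_chars_dicc
-- ===== SOURCE A (Python) =====
-- def check_no_duplicate_chars_dicc(text):
--     duplicate = {}
--     char_lower = text.lower()
--     for current_char in char_lower:
--         if current_char.isalpha():
--             if current_char in duplicate:
--                 duplicate[current_char] += 1
--                 return False
--             else:
--                 duplicate[current_char] = 1
--     return True
-- ===== SOURCE B (Python) =====
-- def check_no_duplicate_chars_dicc(text):
--     letters = sorted(c for c in text.lower() if c.isalpha())
--     for a, b in zip(letters, letters[1:]):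
--         if a == b:
--             return False
--     return True
-- ===== Notes on version B (the rewrite author's own statement) =====
-- stated objective: alternative
-- what changed: Replaces the incremental dict-membership early-return loop with collecting the lowercased alphabetic characters, sorting them, and scanning adjacent pairs for an equal neighbour.
import Mathlib
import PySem

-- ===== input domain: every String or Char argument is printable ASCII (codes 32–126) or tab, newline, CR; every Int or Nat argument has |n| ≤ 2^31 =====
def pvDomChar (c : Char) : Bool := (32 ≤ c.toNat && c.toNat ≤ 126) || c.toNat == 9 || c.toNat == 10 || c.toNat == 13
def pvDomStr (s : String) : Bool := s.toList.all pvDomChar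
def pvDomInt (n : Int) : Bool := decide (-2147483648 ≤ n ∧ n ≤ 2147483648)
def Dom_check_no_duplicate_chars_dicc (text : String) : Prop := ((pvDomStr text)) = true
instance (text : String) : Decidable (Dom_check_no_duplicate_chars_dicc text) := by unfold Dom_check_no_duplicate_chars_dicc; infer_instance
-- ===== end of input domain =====

-- B replaces A's incremental dict-membership loop with sort-then-adjacent-pair scan (alternative decomposition, same results).


-- ===== PORT A =====
-- the for-loop over the lowered text, threading the 'duplicate' dict; early 'return False' on a repeated letter
def pvLoopA : List Char → PySem.Dict Char Int → Bool
  | [], _ => true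
  | c :: rest, d =>
    if PySem.Chars.isalpha c then
      if d.contains c then false
      else pvLoopA rest (d.insert c 1)
    else pvLoopA rest d

def check_no_duplicate_chars_dicc (text : String) : Bool :=
  pvLoopA (PySem.Str.lower text).toList PySem.Dict.empty

-- ===== PORT B =====
-- for a, b in zip(letters, letters[1:]): return False on an equal adjacent pair
def pvAdjScan : List Char → Bool
  | a :: b :: rest => if a == b then false else pvAdjScan (b :: rest)
  | _ => true

def check_no_duplicate_chars_dicc_alt (text : String) : Bool :=
  pvAdjScan (PySem.List.sorted ((PySem.Str.lower text).toList.filter PySem.Chars.isalpha) (fun c => c) false)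

-- ===== PRECONDITION & SPEC =====
def Spec_check_no_duplicate_chars_dicc (text : String) (out : Bool) : Prop := out = check_no_duplicate_chars_dicc_alt text
instance (text : String) (out : Bool) : Decidable (Spec_check_no_duplicate_chars_dicc text out) := by unfold Spec_check_no_duplicate_chars_dicc; infer_instance

-- ===== CLAIM (what is proved, stated in full; the proofs are below) =====
def Claim_equal_check_no_duplicate_chars_dicc : Prop := ∀ (text : String), Dom_check_no_duplicate_chars_dicc text → Spec_check_no_duplicate_chars_dicc text (check_no_duplicate_chars_dicc text)

-- ===== LEMMAS AND PROOFS =====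

-- A's loop succeeds iff the alphabetic characters are distinct and none is already a key of the dict
theorem pvLoopA_eq_true (l : List Char) (d : PySem.Dict Char Int) :
    pvLoopA l d = true ↔
      (l.filter PySem.Chars.isalpha).Nodup ∧
      ∀ c ∈ l.filter PySem.Chars.isalpha, d.contains c = false := by
  induction l generalizing d with
  | nil => simp [pvLoopA]
  | cons a rest ih =>
    by_cases ha : PySem.Chars.isalpha a
    · simp only [pvLoopA, ha, if_pos, List.filter_cons_of_pos ha]
      by_cases hc : d.contains a
      · simp [hc]
      · simp only [hc, Bool.false_eq_true, if_false, ih]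
        constructor
        · rintro ⟨hnd, hall⟩
          have hna : a ∉ rest.filter PySem.Chars.isalpha := fun hmem => by
            have := hall a hmem
            simp at this
          refine ⟨List.nodup_cons.mpr ⟨hna, hnd⟩, fun c hm => ?_⟩
          rcases List.mem_cons.mp hm with rfl | hm'
          · exact Bool.eq_false_iff.mpr hc
          · have := hall c hm'
            rw [PySem.Dict.contains_insert] at this
            exact (Bool.or_eq_false_iff.mp this).2
        · rintro ⟨hnd, hall⟩
          obtain ⟨hna, hnd'⟩ := List.nodup_cons.mp hnd
          refine ⟨hnd', fun c hm => ?_⟩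
          rw [PySem.Dict.contains_insert]
          have hne : (c == a) = false := beq_eq_false_iff_ne.mpr (fun h => hna (h ▸ hm))
          simp [hne, hall c (List.mem_cons_of_mem _ hm)]
    · simp only [pvLoopA, ha, Bool.false_eq_true, if_false, List.filter_cons_of_neg ha]
      exact ih d

-- on a (≤)-sorted list, the adjacent-pair scan decides Nodup
theorem pvAdjScan_eq_true (l : List Char) (hs : l.Pairwise (· ≤ ·)) :
    pvAdjScan l = true ↔ l.Nodup := by
  induction l with
  | nil => simp [pvAdjScan]
  | cons a rest ih =>
    match rest, hs with
    | [], _ => simp [pvAdjScan]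
    | b :: rest', hs =>
      have hab : a ≤ b := (List.pairwise_cons.mp hs).1 b (List.mem_cons_self ..)
      have htail := List.Pairwise.of_cons hs
      by_cases hEq : a = b
      · subst hEq
        simp [pvAdjScan, List.nodup_cons]
      · have hbeq : (a == b) = false := beq_eq_false_iff_ne.mpr hEq
        have hna : a ∉ b :: rest' := by
          intro hmem
          rcases List.mem_cons.mp hmem with h | h
          · exact hEq h
          · have hba : b ≤ a := (List.pairwise_cons.mp htail).1 a h
            exact absurd (lt_of_lt_of_le (lt_of_le_of_ne hab hEq) hba) (lt_irrefl a)
        simp only [pvAdjScan, hbeq, Bool.false_eq_true, if_false]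
        rw [ih htail, List.nodup_cons]
        simp [hna]

-- ===== VERDICT (by name: the statement is the Claim_ definition above) =====
theorem check_no_duplicate_chars_dicc_spec : Claim_equal_check_no_duplicate_chars_dicc := by
  intro text _
  unfold Spec_check_no_duplicate_chars_dicc check_no_duplicate_chars_dicc check_no_duplicate_chars_dicc_alt
  set letters := (PySem.Str.lower text).toList.filter PySem.Chars.isalpha with hl
  have hA : pvLoopA (PySem.Str.lower text).toList PySem.Dict.empty = true ↔ letters.Nodup := by
    rw [pvLoopA_eq_true]
    constructor
    · exact fun h => h.1
    · exact fun h => ⟨h, fun c _ => rfl⟩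
  have hB : pvAdjScan (PySem.List.sorted letters (fun c => c) false) = true ↔ letters.Nodup := by
    rw [pvAdjScan_eq_true _ (PySem.List.sorted_pairwise letters (fun c => c))]
    exact (PySem.List.sorted_perm letters (fun c => c) false).nodup_iff
  rw [Bool.eq_iff_iff, hA, hB]
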